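-- pv_equiv track=rewrite | github.com/whatever60/splisosm_apa_caller | utils_annot.py | _parse_attributes_gencode_gff3
-- ===== SOURCE A (Python) =====
-- def _parse_attributes_gencode_gff3(attributes: str) -> tuple[str, str]:
--     """
--     Parse the attributes column for gencode-gff3 to extract the parent gene ID and transcript ID.
--
--     Args:
--         attributes (str): The attributes string from a GFF3 entry.
--
--     Returns:
--         tuple: A tuple containing the parent gene ID and transcript ID.
--     """
--     parent_gene_id, element_id, gene_id = None, None, None
--     for attr in attributes.split(";"):
--         if attr.startswith("Parent="):
--             parent_gene_id = attr.split("=")[1]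
--         elif attr.startswith("ID="):
--             element_id = attr.split("=")[1]
--         elif attr.startswith("gene_id="):
--             gene_id = attr.split("=")[1]
--     if gene_id != parent_gene_id:
--         parent_gene_id = None
--     return parent_gene_id, element_id
-- ===== SOURCE B (Python) =====
-- def _parse_attributes_gencode_gff3(attributes: str) -> tuple[str, str]:
--     """Reversed-scan re-implementation: the last assignment in A's forward pass
--     is the first match when scanning the tokens back-to-front, so each field is
--     found by an early-exit search over the reversed token list."""
--     tokens = attributes.split(";")[::-1]
--
--     def _first(prefix):
--         for token in tokens:
--             if token.startswith(prefix):
--                 return token.split("=")[1]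
--         return None
--
--     parent_gene_id = _first("Parent=")
--     element_id = _first("ID=")
--     if _first("gene_id=") != parent_gene_id:
--         parent_gene_id = None
--     return parent_gene_id, element_id
-- ===== Notes on version B (the rewrite author's own statement) =====
-- stated objective: alternative
-- what changed: A's single forward pass with three mutable accumulators (last assignment wins) is replaced by three early-exit searches over the reversed token list, exploiting that the last matching token forward is the first match in reverse.
import Mathlib
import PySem

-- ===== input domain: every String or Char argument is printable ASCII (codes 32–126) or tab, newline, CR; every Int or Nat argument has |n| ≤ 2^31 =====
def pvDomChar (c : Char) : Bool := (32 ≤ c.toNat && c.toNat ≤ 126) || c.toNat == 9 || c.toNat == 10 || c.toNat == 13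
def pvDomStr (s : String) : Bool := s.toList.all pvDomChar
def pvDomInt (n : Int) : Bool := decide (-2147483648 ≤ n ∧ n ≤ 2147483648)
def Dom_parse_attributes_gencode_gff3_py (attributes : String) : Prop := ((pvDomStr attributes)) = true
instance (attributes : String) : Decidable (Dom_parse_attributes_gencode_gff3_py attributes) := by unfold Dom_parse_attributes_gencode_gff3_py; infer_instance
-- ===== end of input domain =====

-- B replaces A's single forward pass with three accumulators by three early-exit
-- searches over the reversed token list (last assignment = first match from the right);
-- objective: alternative structure, same cost.

-- shared subexpression attr.split("=")[1]: always in range when attr starts with "<key>="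
-- (the branch guard guarantees a '='), so the Option is always `some` where it is used
def pvVal (attr : String) : Option String :=
  PySem.List.pyGet? ((PySem.Str.split? attr "=").getD []) 1

-- ===== PORT A =====
-- the body of A's for-loop: three elif branches updating (parent, element, gene)
def pvStepA (st : Option String × Option String × Option String) (attr : String) :
    Option String × Option String × Option String :=
  if PySem.Str.startswith attr "Parent=" then (pvVal attr, st.2.1, st.2.2)
  else if PySem.Str.startswith attr "ID=" then (st.1, pvVal attr, st.2.2)
  else if PySem.Str.startswith attr "gene_id=" then (st.1, st.2.1, pvVal attr)
  else st

def parse_attributes_gencode_gff3_py (attributes : String) : Option String × Option String :=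
  let st := ((PySem.Str.split? attributes ";").getD []).foldl pvStepA (none, none, none)
  let parent := if st.2.2 ≠ st.1 then none else st.1
  (parent, st.2.1)

-- ===== PORT B =====
-- _first(prefix): early-exit scan; third argument is the value returned when nothing matches
def pvFirst : List String → String → Option String
  | [], _ => none
  | t :: rest, p => if PySem.Str.startswith t p then pvVal t else pvFirst rest p

def parse_attributes_gencode_gff3_py_alt (attributes : String) : Option String × Option String :=
  let tokens := ((PySem.Str.split? attributes ";").getD []).reverse
  let parent := pvFirst tokens "Parent="
  let element := pvFirst tokens "ID="
  (if pvFirst tokens "gene_id=" ≠ parent then none else parent, element)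

-- ===== PRECONDITION & SPEC =====
def Spec_parse_attributes_gencode_gff3_py (attributes : String) (out : Option String × Option String) : Prop := out = parse_attributes_gencode_gff3_py_alt attributes
instance (attributes : String) (out : Option String × Option String) : Decidable (Spec_parse_attributes_gencode_gff3_py attributes out) := by unfold Spec_parse_attributes_gencode_gff3_py; infer_instance

-- ===== CLAIM (what is proved, stated in full; the proofs are below) =====
def Claim_equal_parse_attributes_gencode_gff3_py : Prop := ∀ (attributes : String), Dom_parse_attributes_gencode_gff3_py attributes → Spec_parse_attributes_gencode_gff3_py attributes (parse_attributes_gencode_gff3_py attributes)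

-- ===== LEMMAS AND PROOFS =====

-- two prefixes with distinct head characters cannot both be prefixes of the same string
theorem pv_sw_excl (l p q : List Char) (c1 c2 : Char) (hp : p.head? = some c1)
    (hq : q.head? = some c2) (hne : c1 ≠ c2)
    (h1 : PySem.Chars.startswith l p = true) : PySem.Chars.startswith l q = false := by
  by_contra h2
  rw [Bool.not_eq_false, PySem.Chars.startswith_iff] at h2
  rw [PySem.Chars.startswith_iff] at h1
  obtain ⟨u, hu⟩ := h1
  obtain ⟨v, hv⟩ := h2
  cases p with
  | nil => simp at hp
  | cons a as =>
    cases q with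
    | nil => simp at hq
    | cons b bs =>
      simp only [List.head?_cons, Option.some.injEq] at hp hq
      rw [← hv, List.cons_append, List.cons_append] at hu
      exact hne (hp ▸ hq ▸ (List.cons.injEq .. ▸ hu).1)

theorem pv_sw_excl_str (t p q : String) (c1 c2 : Char) (hp : p.toList.head? = some c1)
    (hq : q.toList.head? = some c2) (hne : c1 ≠ c2)
    (h1 : PySem.Str.startswith t p = true) : PySem.Str.startswith t q = false := by
  rw [PySem.Str.startswith_eq] at h1 ⊢
  exact pv_sw_excl t.toList p.toList q.toList c1 c2 hp hq hne h1

-- componentwise behaviour of A's loop body (uses mutual exclusivity of the three prefixes)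
theorem pvStepA_fst (st : Option String × Option String × Option String) (t : String) :
    (pvStepA st t).1 = if PySem.Str.startswith t "Parent=" then pvVal t else st.1 := by
  unfold pvStepA; split_ifs <;> rfl

theorem pvStepA_snd (st : Option String × Option String × Option String) (t : String) :
    (pvStepA st t).2.1 = if PySem.Str.startswith t "ID=" then pvVal t else st.2.1 := by
  unfold pvStepA
  by_cases hP : PySem.Str.startswith t "Parent=" = true
  · have hI := pv_sw_excl_str t "Parent=" "ID=" 'P' 'I' rfl rfl (by decide) hP
    rw [if_pos hP, hI]
    rfl
  · rw [if_neg hP]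
    split_ifs <;> rfl

theorem pvStepA_trd (st : Option String × Option String × Option String) (t : String) :
    (pvStepA st t).2.2 = if PySem.Str.startswith t "gene_id=" then pvVal t else st.2.2 := by
  unfold pvStepA
  by_cases hP : PySem.Str.startswith t "Parent=" = true
  · have hG := pv_sw_excl_str t "Parent=" "gene_id=" 'P' 'g' rfl rfl (by decide) hP
    rw [if_pos hP, hG]
    rfl
  · rw [if_neg hP]
    by_cases hI : PySem.Str.startswith t "ID=" = true
    · have hG := pv_sw_excl_str t "ID=" "gene_id=" 'I' 'g' rfl rfl (by decide) hI
      rw [if_pos hI, hG]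
      rfl
    · rw [if_neg hI]
      split_ifs <;> rfl

-- no matching token means the early-exit search returns its default
theorem pvFirst_eq_none (l : List String) (p : String)
    (h : l.any (fun t => PySem.Str.startswith t p) = false) : pvFirst l p = none := by
  induction l with
  | nil => rfl
  | cons t rest ih =>
    simp only [List.any_cons, Bool.or_eq_false_iff] at h
    simp only [pvFirst]
    rw [h.1]
    simp only [Bool.false_eq_true, if_false]
    exact ih h.2

-- invariant: a selector that A's step updates exactly on tokens matching prefix p
-- ends up holding the first match of the reversed token list (default: the initial value)
theorem pv_fold_sel (p : String)
    (sel : (Option String × Option String × Option String) → Option String)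
    (hsel : ∀ st t, sel (pvStepA st t) = if PySem.Str.startswith t p then pvVal t else sel st)
    (ts : List String) (st : Option String × Option String × Option String) :
    sel (ts.foldl pvStepA st) =
      if ts.any (fun t => PySem.Str.startswith t p) then pvFirst ts.reverse p else sel st := by
  induction ts using List.reverseRecOn with
  | nil => simp
  | append_singleton xs x ih =>
    rw [List.foldl_append, List.foldl_cons, List.foldl_nil, hsel, List.reverse_append]
    simp only [List.reverse_singleton, List.singleton_append, List.any_append, List.any_cons,
      List.any_nil, pvFirst]
    by_cases hx : PySem.Str.startswith x p = true
    · rw [hx]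
      simp
    · rw [Bool.not_eq_true] at hx
      rw [hx]
      simp only [Bool.false_eq_true, if_false, Bool.or_false]
      exact ih

-- corollary for the actual initial state (none): the fold component IS the reversed search
theorem pv_fold_first (p : String)
    (sel : (Option String × Option String × Option String) → Option String)
    (hsel : ∀ st t, sel (pvStepA st t) = if PySem.Str.startswith t p then pvVal t else sel st)
    (ts : List String) (st : Option String × Option String × Option String)
    (h0 : sel st = none) :
    sel (ts.foldl pvStepA st) = pvFirst ts.reverse p := by
  rw [pv_fold_sel p sel hsel ts st]
  by_cases h : ts.any (fun t => PySem.Str.startswith t p) = true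
  · rw [if_pos h]
  · rw [Bool.not_eq_true] at h
    rw [h]
    simp only [Bool.false_eq_true, if_false]
    rw [h0, pvFirst_eq_none]
    rw [List.any_reverse]
    exact h

-- ===== VERDICT (by name: the statement is the Claim_ definition above) =====
theorem parse_attributes_gencode_gff3_py_spec : Claim_equal_parse_attributes_gencode_gff3_py := by
  intro attributes _
  unfold Spec_parse_attributes_gencode_gff3_py
  unfold parse_attributes_gencode_gff3_py parse_attributes_gencode_gff3_py_alt
  dsimp only
  rw [pv_fold_first "Parent=" Prod.fst pvStepA_fst _ (none, none, none) rfl,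
    pv_fold_first "ID=" (fun st => st.2.1) pvStepA_snd _ (none, none, none) rfl,
    pv_fold_first "gene_id=" (fun st => st.2.2) pvStepA_trd _ (none, none, none) rfl]
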